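-- pv_equiv track=rewrite | github.com/chxmq/CTF-Writeups | api/index.py | advanced_vigenere_decrypt
-- ===== SOURCE A (Python) =====
-- def advanced_vigenere_decrypt(ciphertext, key, caesar_shift=3):
--     """Multi-layer decryption: Caesar + Vigenère"""
--     if not ciphertext or not key:
--         return ""
--
--     # Caesar decryption first
--     caesar_decrypted = ""
--     for char in ciphertext:
--         if char.isalpha():
--             offset = ord('A')
--             shifted = (ord(char.upper()) - offset - caesar_shift) % 26
--             caesar_decrypted += chr(shifted + offset)
--         else:
--             caesar_decrypted += char
--
--     # Vigenère decryption
--     key = key.upper()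
--     plaintext = ''
--     key_index = 0
--
--     for char in caesar_decrypted:
--         if char.isalpha():
--             offset = ord('A')
--             c = ord(char.upper()) - offset
--             k = ord(key[key_index % len(key)]) - offset
--             p = (c - k) % 26
--             plaintext += chr(p + offset)
--             key_index += 1
--         else:
--             plaintext += char
--
--     return plaintext
-- ===== SOURCE B (Python) =====
-- def advanced_vigenere_decrypt(ciphertext, key, caesar_shift=3):
--     """Multi-layer decryption in a single pass: combined Caesar+Vigenere shift."""
--     if not ciphertext or not key:
--         return ""
--     key = key.upper()
--     out = []
--     key_index = 0
--     for char in ciphertext: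
--         if char.isalpha():
--             k = ord(key[key_index % len(key)]) - ord('A')
--             p = (ord(char.upper()) - ord('A') - caesar_shift - k) % 26
--             out.append(chr(p + ord('A')))
--             key_index += 1
--         else:
--             out.append(char)
--     return ''.join(out)
-- ===== Notes on version B (the rewrite author's own statement) =====
-- stated objective: faster
-- what changed: The two sequential passes (Caesar over the whole text, then Vigenere over the intermediate string) are fused into one loop over the original ciphertext that applies the combined shift (caesar_shift + key shift) per alphabetic character, eliminating the intermediate Caesar string and the second scan.
import Mathlib
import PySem

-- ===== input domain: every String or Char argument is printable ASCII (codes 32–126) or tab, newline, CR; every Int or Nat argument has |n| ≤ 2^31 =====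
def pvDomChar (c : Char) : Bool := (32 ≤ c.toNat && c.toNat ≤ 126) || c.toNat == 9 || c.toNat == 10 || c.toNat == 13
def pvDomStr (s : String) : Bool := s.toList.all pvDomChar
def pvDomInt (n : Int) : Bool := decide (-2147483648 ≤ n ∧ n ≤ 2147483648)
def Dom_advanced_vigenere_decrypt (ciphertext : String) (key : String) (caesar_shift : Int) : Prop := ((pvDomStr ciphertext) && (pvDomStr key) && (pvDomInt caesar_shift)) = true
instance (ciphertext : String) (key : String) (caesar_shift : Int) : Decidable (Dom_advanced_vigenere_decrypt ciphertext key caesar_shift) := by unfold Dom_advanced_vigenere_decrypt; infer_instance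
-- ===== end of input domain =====

-- B fuses A's two passes (Caesar, then Vigenere) into one loop over the ciphertext
-- with a combined shift per alphabetic character (objective: simpler).


-- ===== PORT A =====
-- chr((ord(char.upper()) - ord('A') - caesar_shift) % 26 + ord('A'))
def pvCaesarChar (caesar_shift : Int) (ch : Char) : Char :=
  Char.ofNat ((PySem.Int.mod (((PySem.Chars.upperChar ch).toNat : Int) - 65 - caesar_shift) 26 + 65).toNat)

-- chr((ord(char.upper()) - ord('A') - (ord(key[ki % len(key)]) - ord('A'))) % 26 + ord('A'))
def pvVigChar (keyU : List Char) (ki : Nat) (ch : Char) : Char :=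
  Char.ofNat ((PySem.Int.mod (((PySem.Chars.upperChar ch).toNat : Int) - 65 -
    (((keyU.getD (ki % keyU.length) 'A').toNat : Int) - 65)) 26 + 65).toNat)

def advanced_vigenere_decrypt (ciphertext : String) (key : String) (caesar_shift : Int) : String :=
  if ciphertext.toList = [] ∨ key.toList = [] then "" else
  -- Caesar decryption first
  let caesar := ciphertext.toList.foldl (fun acc ch =>
    if PySem.Chars.isalpha ch then acc ++ [pvCaesarChar caesar_shift ch] else acc ++ [ch]) []
  -- Vigenère decryption
  let keyU := PySem.Chars.upper key.toList
  let st := caesar.foldl (fun (st : List Char × Nat) ch =>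
    if PySem.Chars.isalpha ch then (st.1 ++ [pvVigChar keyU st.2 ch], st.2 + 1)
    else (st.1 ++ [ch], st.2)) (([] : List Char), 0)
  String.ofList st.1

-- ===== PORT B =====
-- combined shift: chr((ord(char.upper()) - ord('A') - caesar_shift - k) % 26 + ord('A'))
def pvFusedChar (keyU : List Char) (caesar_shift : Int) (ki : Nat) (ch : Char) : Char :=
  Char.ofNat ((PySem.Int.mod (((PySem.Chars.upperChar ch).toNat : Int) - 65 - caesar_shift -
    (((keyU.getD (ki % keyU.length) 'A').toNat : Int) - 65)) 26 + 65).toNat)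

def pvFusedGo (keyU : List Char) (caesar_shift : Int) : List Char → Nat → List Char
  | [], _ => []
  | ch :: rest, ki =>
    if PySem.Chars.isalpha ch then pvFusedChar keyU caesar_shift ki ch :: pvFusedGo keyU caesar_shift rest (ki + 1)
    else ch :: pvFusedGo keyU caesar_shift rest ki

def advanced_vigenere_decrypt_alt (ciphertext : String) (key : String) (caesar_shift : Int) : String :=
  if ciphertext.toList = [] ∨ key.toList = [] then "" else
  String.ofList (pvFusedGo (PySem.Chars.upper key.toList) caesar_shift ciphertext.toList 0)

-- ===== PRECONDITION & SPEC =====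
def Spec_advanced_vigenere_decrypt (ciphertext : String) (key : String) (caesar_shift : Int) (out : String) : Prop := out = advanced_vigenere_decrypt_alt ciphertext key caesar_shift
instance (ciphertext : String) (key : String) (caesar_shift : Int) (out : String) : Decidable (Spec_advanced_vigenere_decrypt ciphertext key caesar_shift out) := by unfold Spec_advanced_vigenere_decrypt; infer_instance

-- ===== CLAIM (what is proved, stated in full; the proofs are below) =====
def Claim_equal_advanced_vigenere_decrypt : Prop := ∀ (ciphertext : String) (key : String) (caesar_shift : Int), Dom_advanced_vigenere_decrypt ciphertext key caesar_shift → Spec_advanced_vigenere_decrypt ciphertext key caesar_shift (advanced_vigenere_decrypt ciphertext key caesar_shift)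

-- ===== LEMMAS AND PROOFS =====

-- Caesar output chars are uppercase letters; upperChar fixes them and they stay alphabetic.
theorem pvCaesar_letter (r : Int) (h0 : 0 ≤ r) (h1 : r < 26) :
    ((PySem.Chars.upperChar (Char.ofNat (r + 65).toNat)).toNat : Int) = r + 65 ∧
      PySem.Chars.isalpha (Char.ofNat (r + 65).toNat) = true := by
  interval_cases r <;> exact ⟨by decide, by decide⟩

theorem pvCaesar_isalpha (caesar_shift : Int) (ch : Char) :
    PySem.Chars.isalpha (pvCaesarChar caesar_shift ch) = true := by
  unfold pvCaesarChar
  exact (pvCaesar_letter _ (PySem.Int.mod_nonneg _ (by norm_num))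
    (PySem.Int.mod_lt _ (by norm_num))).2

theorem pvVig_caesar_fuse (keyU : List Char) (caesar_shift : Int) (ki : Nat) (ch : Char) :
    pvVigChar keyU ki (pvCaesarChar caesar_shift ch) = pvFusedChar keyU caesar_shift ki ch := by
  unfold pvVigChar pvCaesarChar pvFusedChar
  set c : Int := ((PySem.Chars.upperChar ch).toNat : Int) with hc
  set k : Int := ((keyU.getD (ki % keyU.length) 'A').toNat : Int) with hk
  have h0 : (0:Int) ≤ PySem.Int.mod (c - 65 - caesar_shift) 26 :=
    PySem.Int.mod_nonneg _ (by norm_num)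
  have h1 : PySem.Int.mod (c - 65 - caesar_shift) 26 < 26 :=
    PySem.Int.mod_lt _ (by norm_num)
  rw [(pvCaesar_letter _ h0 h1).1]
  congr 2
  simp only [PySem.Int.mod_eq_emod_of_pos (by norm_num : (0:Int) < 26)]
  omega

-- the Vigenère pass of A as a direct recursion
def pvVigGo (keyU : List Char) : List Char → Nat → List Char
  | [], _ => []
  | ch :: rest, ki =>
    if PySem.Chars.isalpha ch then pvVigChar keyU ki ch :: pvVigGo keyU rest (ki + 1)
    else ch :: pvVigGo keyU rest ki

theorem pvVig_foldl (keyU : List Char) (cs : List Char) :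
    ∀ (acc : List Char) (ki : Nat),
      (cs.foldl (fun (st : List Char × Nat) ch =>
        if PySem.Chars.isalpha ch then (st.1 ++ [pvVigChar keyU st.2 ch], st.2 + 1)
        else (st.1 ++ [ch], st.2)) (acc, ki)).1 = acc ++ pvVigGo keyU cs ki := by
  induction cs with
  | nil => intro acc ki; simp [pvVigGo]
  | cons ch rest ih =>
    intro acc ki
    by_cases h : PySem.Chars.isalpha ch = true <;>
      simp [pvVigGo, h, ih, List.append_assoc]

theorem pvCaesar_foldl (caesar_shift : Int) (cs : List Char) :
    ∀ acc : List Char,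
      cs.foldl (fun acc ch =>
        if PySem.Chars.isalpha ch then acc ++ [pvCaesarChar caesar_shift ch] else acc ++ [ch]) acc
      = acc ++ cs.map (fun ch => if PySem.Chars.isalpha ch then pvCaesarChar caesar_shift ch else ch) := by
  induction cs with
  | nil => intro acc; simp
  | cons ch rest ih =>
    intro acc
    by_cases h : PySem.Chars.isalpha ch = true <;>
      simp [h, ih, List.append_assoc]

theorem pvVig_map_caesar (keyU : List Char) (caesar_shift : Int) (cs : List Char) :
    ∀ ki : Nat,
      pvVigGo keyU (cs.map (fun ch => if PySem.Chars.isalpha ch then pvCaesarChar caesar_shift ch else ch)) ki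
      = pvFusedGo keyU caesar_shift cs ki := by
  induction cs with
  | nil => intro ki; simp [pvVigGo, pvFusedGo]
  | cons ch rest ih =>
    intro ki
    by_cases h : PySem.Chars.isalpha ch = true
    · simp [pvVigGo, pvFusedGo, h, pvCaesar_isalpha, pvVig_caesar_fuse, ih]
    · simp [pvVigGo, pvFusedGo, h, ih]

-- ===== VERDICT (by name: the statement is the Claim_ definition above) =====
theorem advanced_vigenere_decrypt_spec : Claim_equal_advanced_vigenere_decrypt := by
  intro ciphertext key caesar_shift _
  unfold Spec_advanced_vigenere_decrypt advanced_vigenere_decrypt advanced_vigenere_decrypt_alt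
  rcases Decidable.em (ciphertext.toList = [] ∨ key.toList = []) with hg | hg
  · rw [if_pos hg, if_pos hg]
  · rw [if_neg hg, if_neg hg]
    simp only [pvCaesar_foldl, pvVig_foldl, List.nil_append, pvVig_map_caesar]
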